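-- pv_equiv track=rewrite | github.com/kjyoa09/coding-test | boj/Platinum V/1086 0과 1.py | bfs
-- ===== SOURCE A (Python) =====
-- from collections import deque
--
-- def bfs(n):
--     que = deque([1])
--     par = [0] * (n+1)
--     par[1] = (-1,-1)
--     while que:
--         remain = que.popleft()
--         if remain == 0:
--             break
--
--         if par[(remain*(10%n))%n] == 0:
--             que.append((remain*(10%n))%n)
--             par[(remain*(10%n))%n] = (remain,'0')
--
--         if par[(remain*(10%n)+1)%n] == 0:
--             que.append((remain*(10%n)+1)%n)
--             par[((remain*(10%n)+1)%n)] = (remain,'1')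
--     else:
--         return 'BRAK'
--     remain,ans = par[0]
--     while par[remain] != (-1,-1):
--         remain,tmp = par[remain]
--         ans += tmp
--     ans += '1'
--     return ans[::-1]
-- ===== SOURCE B (Python) =====
-- from collections import deque
--
-- def bfs(n):
--     que = deque([(1, "1")])
--     visited = [False] * (n + 1)
--     visited[1] = True
--     while que:
--         r, s = que.popleft()
--         if r == 0:
--             return s
--         r0 = r * 10 % n
--         r1 = (r * 10 + 1) % n
--         if not visited[r0]:
--             visited[r0] = True
--             que.append((r0, s + "0"))
--         if not visited[r1]:
--             visited[r1] = True
--             que.append((r1, s + "1"))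
--     return "BRAK"
-- ===== Notes on version B (the rewrite author's own statement) =====
-- stated objective: simpler
-- what changed: B runs the same BFS over residues mod n but carries the partial digit string in the queue and keeps a plain boolean visited list, returning the string the moment residue 0 is popped, which removes A's parent-pointer array and its whole backward reconstruction-and-reverse pass.
import Mathlib
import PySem

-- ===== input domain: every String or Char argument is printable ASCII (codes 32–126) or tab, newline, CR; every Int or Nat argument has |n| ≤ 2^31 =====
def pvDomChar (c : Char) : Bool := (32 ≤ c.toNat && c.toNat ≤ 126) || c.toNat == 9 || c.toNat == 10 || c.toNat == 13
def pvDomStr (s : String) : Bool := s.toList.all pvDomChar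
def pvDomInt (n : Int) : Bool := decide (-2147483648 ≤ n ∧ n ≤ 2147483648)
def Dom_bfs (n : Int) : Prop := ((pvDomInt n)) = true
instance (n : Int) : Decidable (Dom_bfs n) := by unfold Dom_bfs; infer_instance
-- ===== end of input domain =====

-- B replaces A's parent-pointer array and backward reconstruction-and-reverse pass by a
-- BFS that carries the partial digit string in the queue and a plain boolean visited list.

-- ===== PORT A =====
-- A's `par` entries: the int 0 (unvisited) | the sentinel (-1,-1) | a pair (parent, digit)
inductive PEnt
  | un : PEnt
  | root : PEnt
  | pr : Int → Char → PEnt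
deriving DecidableEq, Repr

-- A's while-loop, fuel-bounded (the fuel given in `bfs` exceeds the maximal number of
-- iterations: each iteration pops one element, and at most n + 2 elements are ever
-- enqueued since every enqueue marks a previously-unvisited cell of `par`).
-- `some par` = the `break` path, `none` = the queue emptied (while-else: 'BRAK').
def bfsLoopA (n : Int) (fuel : Nat) (que : List Int) (par : List PEnt) : Option (List PEnt) :=
  match fuel with
  | 0 => none
  | fuel + 1 =>
    match que with
    | [] => none
    | remain :: que =>
      if remain = 0 then some par
      else
        let i0 : Int := PySem.Int.mod (remain * PySem.Int.mod 10 n) n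
        let (que, par) :=
          if PySem.List.pyGetD par i0 PEnt.un = PEnt.un then
            (que ++ [i0], PySem.List.pySetD par i0 (PEnt.pr remain '0'))
          else (que, par)
        let i1 : Int := PySem.Int.mod (remain * PySem.Int.mod 10 n + 1) n
        if PySem.List.pyGetD par i1 PEnt.un = PEnt.un then
          bfsLoopA n fuel (que ++ [i1]) (PySem.List.pySetD par i1 (PEnt.pr remain '1'))
        else bfsLoopA n fuel que par

-- A's backward reconstruction `while par[remain] != (-1,-1): ...` plus the epilogue
-- `ans += '1'; return ans[::-1]` (run when the loop condition fails, i.e. at `root`).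
def reconA (fuel : Nat) (par : List PEnt) (remain : Int) (ans : List Char) : String :=
  match fuel with
  | 0 => ""          -- fuel exhaustion, unreachable with the fuel given in `bfs`
  | fuel + 1 =>
    match PySem.List.pyGetD par remain PEnt.un with
    | PEnt.root => String.mk (ans ++ ['1']).reverse
    | PEnt.pr p c => reconA fuel par p (ans ++ [c])
    | PEnt.un => ""  -- Python would raise unpacking the int 0; unreachable from A's loop

def bfs (n : Int) : String :=
  -- par = [0]*(n+1); par[1] = (-1,-1)    (index 1 is in range for every n ≥ 1)
  let par := PySem.List.pySetD (List.replicate (n + 1).toNat PEnt.un) 1 PEnt.root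
  match bfsLoopA n (2 * n.toNat + 4) [1] par with
  | none => "BRAK"
  | some par =>
    -- remain, ans = par[0]   (always a (parent, digit) pair on the break path)
    match PySem.List.pyGetD par 0 PEnt.un with
    | PEnt.pr remain c => reconA (2 * n.toNat + 4) par remain [c]
    | _ => "BRAK"

-- ===== PORT B =====
-- B's while-loop; the carried Python string is modeled as a List Char (s + "0" = s ++ ['0']).
def bfsLoopB (n : Int) (fuel : Nat) (que : List (Int × List Char)) (vis : List Bool) : String :=
  match fuel with
  | 0 => "BRAK"      -- fuel exhaustion, unreachable with the fuel given in `bfs_alt`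
  | fuel + 1 =>
    match que with
    | [] => "BRAK"
    | (r, s) :: que =>
      if r = 0 then String.mk s
      else
        let r0 : Int := PySem.Int.mod (r * 10) n
        let r1 : Int := PySem.Int.mod (r * 10 + 1) n
        let (que, vis) :=
          if PySem.List.pyGetD vis r0 false = false then
            (que ++ [(r0, s ++ ['0'])], PySem.List.pySetD vis r0 true)
          else (que, vis)
        if PySem.List.pyGetD vis r1 false = false then
          bfsLoopB n fuel (que ++ [(r1, s ++ ['1'])]) (PySem.List.pySetD vis r1 true)
        else bfsLoopB n fuel que vis

def bfs_alt (n : Int) : String :=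
  -- visited = [False]*(n+1); visited[1] = True
  let vis := PySem.List.pySetD (List.replicate (n + 1).toNat false) 1 true
  bfsLoopB n (2 * n.toNat + 4) [(1, ['1'])] vis

-- ===== PRECONDITION & SPEC =====
-- A raises IndexError (the assignment `par[1] = (-1,-1)` on a list of length ≤ 1) for every n ≤ 0; B raises there too.
def Pre_bfs (n : Int) : Prop := 1 ≤ n
instance (n : Int) : Decidable (Pre_bfs n) := by unfold Pre_bfs; infer_instance
def pvWitness_bfs : Int := 7

def Spec_bfs (n : Int) (out : String) : Prop := out = bfs_alt n
instance (n : Int) (out : String) : Decidable (Spec_bfs n out) := by unfold Spec_bfs; infer_instance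

-- ===== CLAIM (what is proved, stated in full; the proofs are below) =====
def Claim_equal_bfs : Prop := ∀ (n : Int), Dom_bfs n → Pre_bfs n → Spec_bfs n (bfs n)

-- ===== LEMMAS AND PROOFS =====

-- Bool view of a par entry: "this residue is visited".
def visOf : PEnt → Bool
  | PEnt.un => false
  | _ => true

@[simp] lemma visOf_eq_false (e : PEnt) : visOf e = false ↔ e = PEnt.un := by
  cases e <;> simp [visOf]

-- `Chain par r l`: walking the parent pointers from residue r collects exactly the
-- digits l (A's `ans` right before the final reverse, including the trailing '1').
inductive Chain (par : List PEnt) : Int → List Char → Prop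
  | root (r : Int) (h0 : 0 ≤ r)
      (h : PySem.List.pyGetD par r PEnt.un = PEnt.root) : Chain par r ['1']
  | step (r p : Int) (c : Char) (l : List Char) (h0 : 0 ≤ r)
      (h : PySem.List.pyGetD par r PEnt.un = PEnt.pr p c)
      (hc : Chain par p l) : Chain par r (c :: l)

lemma pyGetD_pySetD_ne {α : Type} (l : List α) (d v : α) (i j : Int)
    (hi : 0 ≤ i) (hj : 0 ≤ j) (hne : j ≠ i) :
    PySem.List.pyGetD (PySem.List.pySetD l i v) j d = PySem.List.pyGetD l j d := by
  rw [PySem.List.pySetD_of_nonneg _ _ hi, PySem.List.pyGetD_of_nonneg _ _ hj,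
      PySem.List.pyGetD_of_nonneg _ _ hj]
  rw [List.getD_eq_getElem?_getD, List.getD_eq_getElem?_getD,
      List.getElem?_set_ne (by omega)]

lemma pyGetD_pySetD_self {α : Type} (l : List α) (d v : α) (i : Int)
    (hi : 0 ≤ i) (hlen : i.toNat < l.length) :
    PySem.List.pyGetD (PySem.List.pySetD l i v) i d = v := by
  rw [PySem.List.pySetD_of_nonneg _ _ hi, PySem.List.pyGetD_of_nonneg _ _ hi]
  rw [List.getD_eq_getElem?_getD, List.getElem?_set_self (by simpa using hlen)]
  rfl

lemma map_pySetD {α β : Type} (f : α → β) (l : List α) (i : Int) (v : α) (hi : 0 ≤ i) :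
    (PySem.List.pySetD l i v).map f = PySem.List.pySetD (l.map f) i (f v) := by
  rw [PySem.List.pySetD_of_nonneg _ _ hi, PySem.List.pySetD_of_nonneg _ _ hi, List.map_set]

lemma pyGetD_map_visOf (l : List PEnt) (i : Int) :
    PySem.List.pyGetD (l.map visOf) i false = visOf (PySem.List.pyGetD l i PEnt.un) := by
  have : (false : Bool) = visOf PEnt.un := rfl
  rw [this, PySem.List.pyGetD_map]

lemma chain_pySetD (par : List PEnt) (i : Int) (v : PEnt) (r : Int) (l : List Char)
    (hi : 0 ≤ i) (hun : PySem.List.pyGetD par i PEnt.un = PEnt.un)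
    (hc : Chain par r l) : Chain (PySem.List.pySetD par i v) r l := by
  induction hc with
  | root r h0 h =>
    exact Chain.root _ h0
      (by rw [pyGetD_pySetD_ne _ _ _ _ _ hi h0 (by rintro rfl; rw [h] at hun; cases hun)]; exact h)
  | step r p c l h0 h hc ih =>
    exact Chain.step _ _ _ _ h0
      (by rw [pyGetD_pySetD_ne _ _ _ _ _ hi h0 (by rintro rfl; rw [h] at hun; cases hun)]; exact h) ih

lemma reconA_chain (par : List PEnt) (p : Int) (l : List Char) (hc : Chain par p l) :
    ∀ (fuel : Nat) (ans : List Char), l.length ≤ fuel →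
      reconA fuel par p ans = String.mk (ans ++ l).reverse := by
  induction hc with
  | root r h0 h =>
    intro fuel ans hf
    match fuel with
    | f + 1 => rw [reconA, h]
  | step r p c l h0 h hc ih =>
    intro fuel ans hf
    match fuel with
    | f + 1 =>
      rw [reconA, h]
      exact (ih f (ans ++ [c]) (by simp at hf; omega)).trans (by simp)

lemma mod_i0_eq (n r : Int) (hn : 1 ≤ n) :
    PySem.Int.mod (r * PySem.Int.mod 10 n) n = PySem.Int.mod (r * 10) n := by
  rw [PySem.Int.mod_eq_emod_of_pos (by omega), PySem.Int.mod_eq_emod_of_pos (by omega),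
      PySem.Int.mod_eq_emod_of_pos (by omega)]
  conv_lhs => rw [Int.mul_emod, Int.emod_emod_of_dvd _ dvd_rfl, ← Int.mul_emod]

lemma mod_i1_eq (n r : Int) (hn : 1 ≤ n) :
    PySem.Int.mod (r * PySem.Int.mod 10 n + 1) n = PySem.Int.mod (r * 10 + 1) n := by
  rw [PySem.Int.mod_eq_emod_of_pos (by omega), PySem.Int.mod_eq_emod_of_pos (by omega),
      PySem.Int.mod_eq_emod_of_pos (by omega)]
  conv_lhs => rw [Int.add_emod, Int.mul_emod, Int.emod_emod_of_dvd _ dvd_rfl, ← Int.mul_emod,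
    ← Int.add_emod]

-- Eliminator for Chain: a residue with a chain is marked either root or (parent, digit).
lemma chain_elim (par : List PEnt) (r : Int) (l : List Char) (h : Chain par r l) :
    (PySem.List.pyGetD par r PEnt.un = PEnt.root ∧ l = ['1']) ∨
    (∃ p c l', PySem.List.pyGetD par r PEnt.un = PEnt.pr p c ∧ l = c :: l' ∧ Chain par p l') := by
  cases h with
  | root r h0 hh => exact Or.inl ⟨hh, rfl⟩
  | step r p c l h0 hh hc => exact Or.inr ⟨p, c, l, hh, rfl, hc⟩

-- Marking an unvisited residue i with (parent r, digit c) gives it the chain of r extended by c.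
lemma chain_mark (par : List PEnt) (i r : Int) (c : Char) (s : List Char)
    (hi : 0 ≤ i) (hlen : i.toNat < par.length)
    (hun : PySem.List.pyGetD par i PEnt.un = PEnt.un)
    (hch : Chain par r s.reverse) :
    Chain (PySem.List.pySetD par i (PEnt.pr r c)) i (s ++ [c]).reverse := by
  have hrev : (s ++ [c]).reverse = c :: s.reverse := by simp
  rw [hrev]
  exact Chain.step i r c s.reverse hi (pyGetD_pySetD_self _ _ _ _ hi hlen)
    (chain_pySetD _ _ _ _ _ hi hun hch)

-- Writing a (parent, digit) pair anywhere keeps par[0] ≠ root.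
lemma P0_pySetD (par : List PEnt) (i r : Int) (c : Char) (hi : 0 ≤ i) (hlen : i.toNat < par.length)
    (hP0 : PySem.List.pyGetD par 0 PEnt.un ≠ PEnt.root) :
    PySem.List.pyGetD (PySem.List.pySetD par i (PEnt.pr r c)) 0 PEnt.un ≠ PEnt.root := by
  by_cases hz : (0 : Int) = i
  · subst hz
    rw [pyGetD_pySetD_self _ _ _ _ hi hlen]
    simp
  · rw [pyGetD_pySetD_ne _ _ _ _ _ hi le_rfl hz]
    exact hP0

-- The lockstep invariant: B's queue carries, for each residue in A's queue, exactly the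
-- string A would reconstruct for it, and B's visited list is the Bool image of A's par.
lemma lockstep (n : Int) (hn : 1 ≤ n) :
    ∀ (fuel : Nat) (queB : List (Int × List Char)) (par : List PEnt),
      par.length = (n + 1).toNat →
      PySem.List.pyGetD par 0 PEnt.un ≠ PEnt.root →
      (∀ p ∈ queB, 0 ≤ p.1 ∧ Chain par p.1 p.2.reverse ∧ p.2.length + fuel ≤ 2 * n.toNat + 5) →
      bfsLoopB n fuel queB (par.map visOf) =
        (match bfsLoopA n fuel (queB.map Prod.fst) par with
         | none => "BRAK"
         | some par' =>
           match PySem.List.pyGetD par' 0 PEnt.un with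
           | PEnt.pr remain c => reconA (2 * n.toNat + 4) par' remain [c]
           | _ => "BRAK") := by
  intro fuel
  induction fuel with
  | zero => intro queB par hlen hP0 hinv; rfl
  | succ f ih =>
    intro queB par hlen hP0 hinv
    match queB with
    | [] => rfl
    | (r, s) :: rest =>
      obtain ⟨hr0, hchain, hslen⟩ := hinv (r, s) (by simp)
      dsimp only at hr0 hchain hslen
      by_cases hr : r = 0
      · -- popped residue 0: B returns the carried string, A breaks and reconstructs it
        subst hr
        rw [bfsLoopB, List.map_cons, bfsLoopA, if_pos rfl, if_pos rfl]
        rcases chain_elim _ _ _ hchain with ⟨hroot, _⟩ | ⟨p, c, l', hpr, hlrev, hc⟩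
        · exact absurd hroot hP0
        · show String.mk s =
            (match PySem.List.pyGetD par 0 PEnt.un with
             | PEnt.pr remain c => reconA (2 * n.toNat + 4) par remain [c]
             | _ => "BRAK")
          rw [hpr]
          have hl' : l'.length ≤ 2 * n.toNat + 4 := by
            have := congrArg List.length hlrev
            simp at this
            omega
          show String.mk s = reconA (2 * n.toNat + 4) par p [c]
          rw [reconA_chain par p l' hc _ [c] hl']
          have hs : ([c] ++ l' : List Char) = s.reverse := by simp [hlrev]
          rw [hs, List.reverse_reverse]
      · -- popped residue r ≠ 0: both sides test/mark the same two successor residues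
        have e0 := mod_i0_eq n r hn
        have e1 := mod_i1_eq n r hn
        set i0 : Int := PySem.Int.mod (r * 10) n with hi0def
        set i1 : Int := PySem.Int.mod (r * 10 + 1) n with hi1def
        have hi0n : 0 ≤ i0 := PySem.Int.mod_nonneg _ (by omega)
        have hi1n : 0 ≤ i1 := PySem.Int.mod_nonneg _ (by omega)
        have hi0l : i0.toNat < par.length := by
          have := PySem.Int.mod_lt (r * 10) (b := n) (by omega); omega
        have hi1l : i1.toNat < par.length := by
          have := PySem.Int.mod_lt (r * 10 + 1) (b := n) (by omega); omega
        have hv0 : PySem.List.pyGetD (List.map visOf par) i0 false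
            = visOf (PySem.List.pyGetD par i0 PEnt.un) := pyGetD_map_visOf par i0
        rw [bfsLoopB, List.map_cons, bfsLoopA]
        simp only [if_neg hr, e0, e1, ← hi0def, ← hi1def]
        by_cases h0 : PySem.List.pyGetD par i0 PEnt.un = PEnt.un
        · -- successor i0 unvisited: both mark it and enqueue
          have hb0 : PySem.List.pyGetD (List.map visOf par) i0 false = false := by
            rw [hv0, h0]; rfl
          simp only [if_pos h0, if_pos hb0]
          have hmap1 : PySem.List.pySetD (List.map visOf par) i0 true
              = List.map visOf (PySem.List.pySetD par i0 (PEnt.pr r '0')) := by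
            rw [map_pySetD _ _ _ _ hi0n]; rfl
          set par1 := PySem.List.pySetD par i0 (PEnt.pr r '0') with hpar1
          have hlen1 : par1.length = (n + 1).toNat := by
            rw [hpar1, PySem.List.length_pySetD]; exact hlen
          have hi1l1 : i1.toNat < par1.length := by rw [hlen1]; omega
          have hv1 : PySem.List.pyGetD (List.map visOf par1) i1 false
              = visOf (PySem.List.pyGetD par1 i1 PEnt.un) := pyGetD_map_visOf par1 i1
          rw [hmap1]
          by_cases h1 : PySem.List.pyGetD par1 i1 PEnt.un = PEnt.un
          · have hb1 : PySem.List.pyGetD (List.map visOf par1) i1 false = false := by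
              rw [hv1, h1]; rfl
            simp only [if_pos h1, if_pos hb1]
            set par2 := PySem.List.pySetD par1 i1 (PEnt.pr r '1') with hpar2
            have hmap2 : PySem.List.pySetD (List.map visOf par1) i1 true = List.map visOf par2 := by
              rw [hpar2, map_pySetD _ _ _ _ hi1n]; rfl
            rw [hmap2, ih (rest ++ [(i0, s ++ ['0'])] ++ [(i1, s ++ ['1'])]) par2 ?hl ?hp ?hq]
            · simp
            case hl => rw [hpar2, PySem.List.length_pySetD]; exact hlen1
            case hp =>
              exact P0_pySetD _ _ _ _ hi1n hi1l1 (P0_pySetD _ _ _ _ hi0n hi0l hP0)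
            case hq =>
              intro p hp
              rcases List.mem_append.mp hp with hp | hp
              · rcases List.mem_append.mp hp with hp | hp
                · obtain ⟨hpn, hpc, hpl⟩ := hinv p (List.mem_cons_of_mem _ hp)
                  exact ⟨hpn, chain_pySetD _ _ _ _ _ hi1n h1 (chain_pySetD _ _ _ _ _ hi0n h0 hpc), by omega⟩
                · simp at hp; subst hp
                  refine ⟨hi0n, chain_pySetD _ _ _ _ _ hi1n h1 (chain_mark _ _ _ _ _ hi0n hi0l h0 hchain), by simp; omega⟩
              · simp at hp; subst hp
                have hch1 : Chain par1 r s.reverse := chain_pySetD _ _ _ _ _ hi0n h0 hchain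
                refine ⟨hi1n, chain_mark _ _ _ _ _ hi1n hi1l1 h1 hch1, by simp; omega⟩
          · have hb1 : ¬ PySem.List.pyGetD (List.map visOf par1) i1 false = false := by
              rw [hv1]; simpa using h1
            simp only [if_neg h1, if_neg hb1]
            rw [ih (rest ++ [(i0, s ++ ['0'])]) par1 hlen1 (P0_pySetD _ _ _ _ hi0n hi0l hP0) ?hq]
            · simp
            case hq =>
              intro p hp
              rcases List.mem_append.mp hp with hp | hp
              · obtain ⟨hpn, hpc, hpl⟩ := hinv p (List.mem_cons_of_mem _ hp)
                exact ⟨hpn, chain_pySetD _ _ _ _ _ hi0n h0 hpc, by omega⟩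
              · simp at hp; subst hp
                refine ⟨hi0n, chain_mark _ _ _ _ _ hi0n hi0l h0 hchain, by simp; omega⟩
        · -- successor i0 already visited: neither side touches it
          have hb0 : ¬ PySem.List.pyGetD (List.map visOf par) i0 false = false := by
            rw [hv0]; simpa using h0
          simp only [if_neg h0, if_neg hb0]
          have hv1 : PySem.List.pyGetD (List.map visOf par) i1 false
              = visOf (PySem.List.pyGetD par i1 PEnt.un) := pyGetD_map_visOf par i1
          by_cases h1 : PySem.List.pyGetD par i1 PEnt.un = PEnt.un
          · have hb1 : PySem.List.pyGetD (List.map visOf par) i1 false = false := by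
              rw [hv1, h1]; rfl
            simp only [if_pos h1, if_pos hb1]
            have hmap2 : PySem.List.pySetD (List.map visOf par) i1 true
                = List.map visOf (PySem.List.pySetD par i1 (PEnt.pr r '1')) := by
              rw [map_pySetD _ _ _ _ hi1n]; rfl
            rw [hmap2, ih (rest ++ [(i1, s ++ ['1'])]) _ ?hl (P0_pySetD _ _ _ _ hi1n hi1l hP0) ?hq]
            · simp
            case hl => rw [PySem.List.length_pySetD]; exact hlen
            case hq =>
              intro p hp
              rcases List.mem_append.mp hp with hp | hp
              · obtain ⟨hpn, hpc, hpl⟩ := hinv p (List.mem_cons_of_mem _ hp)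
                exact ⟨hpn, chain_pySetD _ _ _ _ _ hi1n h1 hpc, by omega⟩
              · simp at hp; subst hp
                refine ⟨hi1n, chain_mark _ _ _ _ _ hi1n hi1l h1 hchain, by simp; omega⟩
          · have hb1 : ¬ PySem.List.pyGetD (List.map visOf par) i1 false = false := by
              rw [hv1]; simpa using h1
            simp only [if_neg h1, if_neg hb1]
            exact ih rest par hlen hP0 (fun p hp => by
              obtain ⟨hpn, hpc, hpl⟩ := hinv p (List.mem_cons_of_mem _ hp)
              exact ⟨hpn, hpc, by omega⟩)

-- ===== VERDICT (by name: the statement is the Claim_ definition above) =====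
theorem bfs_spec : Claim_equal_bfs := by
  intro n _ hpre
  have hn : 1 ≤ n := hpre
  unfold Spec_bfs bfs bfs_alt
  have hmap : PySem.List.pySetD (List.replicate (n + 1).toNat false) 1 true
      = List.map visOf (PySem.List.pySetD (List.replicate (n + 1).toNat PEnt.un) 1 PEnt.root) := by
    rw [map_pySetD _ _ _ _ (by norm_num : (0:Int) ≤ 1), List.map_replicate]
    rfl
  rw [hmap]
  have hl : (PySem.List.pySetD (List.replicate (n + 1).toNat PEnt.un) 1 PEnt.root).length
      = (n + 1).toNat := by
    rw [PySem.List.length_pySetD, List.length_replicate]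
  have hrep : PySem.List.pyGetD (List.replicate (n + 1).toNat PEnt.un) 0 PEnt.un = PEnt.un := by
    rw [PySem.List.pyGetD_of_nonneg _ _ le_rfl]
    simp [List.getD_eq_getElem?_getD, List.getElem?_replicate]
    split <;> rfl
  have hp : PySem.List.pyGetD (PySem.List.pySetD (List.replicate (n + 1).toNat PEnt.un) 1 PEnt.root)
      0 PEnt.un ≠ PEnt.root := by
    rw [pyGetD_pySetD_ne _ _ _ _ _ (by norm_num) le_rfl (by norm_num), hrep]
    simp
  have hq : ∀ p ∈ [((1 : Int), ['1'])],
      0 ≤ p.1 ∧ Chain (PySem.List.pySetD (List.replicate (n + 1).toNat PEnt.un) 1 PEnt.root)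
        p.1 p.2.reverse ∧ p.2.length + (2 * n.toNat + 4) ≤ 2 * n.toNat + 5 := by
    intro p hp
    simp at hp
    subst hp
    refine ⟨by norm_num, ?_, by simp only [List.length_cons, List.length_nil]; omega⟩
    show Chain _ 1 (['1'].reverse)
    have : (['1'] : List Char).reverse = ['1'] := rfl
    rw [this]
    exact Chain.root 1 (by norm_num)
      (pyGetD_pySetD_self _ _ _ _ (by norm_num) (by rw [List.length_replicate]; omega))
  exact (lockstep n hn (2 * n.toNat + 4) [(1, ['1'])]
    (PySem.List.pySetD (List.replicate (n + 1).toNat PEnt.un) 1 PEnt.root) hl hp hq).symm
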